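-- pv_equiv track=rewrite | github.com/NolantheNerd/scripture_phaser | scripture_phaser/passage.py | clean_reference
-- ===== SOURCE A (Python) =====
-- def clean_reference(ref, for_verse_selection):
--     ref = ref.strip().lower().title()
--
--     ref = ref \
--         .replace("Psalm", "Psalms") \
--         .replace("First", "One") \
--         .replace("1 Samuel", "One Samuel") \
--         .replace("1 Kings", "One Kings") \
--         .replace("1 Chronicles", "One Chronicles") \
--         .replace("1 Corinthians", "One Corinthians") \
--         .replace("1 Thessalonians", "One Thessalonians") \
--         .replace("1 Timothy", "One Timothy") \
--         .replace("1 Peter", "One Peter") \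
--         .replace("1 John", "One John") \
--         .replace("Second", "Two") \
--         .replace("2 Samuel", "Two Samuel") \
--         .replace("2 Kings", "Two Kings") \
--         .replace("2 Chronicles", "Two Chronicles") \
--         .replace("2 Corinthians", "Two Corinthians") \
--         .replace("2 Thessalonians", "Two Thessalonians") \
--         .replace("2 Timothy", "Two Timothy") \
--         .replace("2 Peter", "Two Peter") \
--         .replace("2 John", "Two John") \
--         .replace("Third", "Three") \
--         .replace("3 John", "Three John")
--
--     new_ref = ""
--     prev_char = ""
--     for i, char in enumerate(ref):
--         next_char = ref[min(len(ref)-1, i+1)]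
--         # Insert Space After Book Name and Before Chapter/Verse Number
--         if char.isdigit() and prev_char.isalpha():
--             new_ref += " "
--
--         # Insert Space After Verse Number and Before Second Book Name
--         elif char.isalpha() and prev_char.isdigit():
--             new_ref += " "
--
--         # Insert Space Between Number and "-"
--         elif char == "-" and prev_char != " " and prev_char != "":
--             new_ref += " "
--
--         # Insert Space Between "-" and Number/Book
--         elif prev_char == "-" and char != " ":
--             new_ref += " "
--
--         elif char == " ":
--             # Remove Space Before ":" and After Chapter Number
--             if prev_char.isdigit() and next_char == ":":
--                 prev_char = ref[max(0, i)]
--                 continue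
--             # Remove Space After ":" and Before Verse Number
--             elif prev_char == ":" and next_char.isdigit():
--                 prev_char = ref[max(0, i)]
--                 continue
--
--         prev_char = ref[max(0, i)]
--         new_ref += ref[i]
--
--     # APIs like ESV API Don't Recognize "One John" only "1 John"
--     # So for the sake of the AGENTS (and End Users with Passage.show())
--     # Convert Reference to Use Digit in Book Name (Doesn't work with
--     # reference_to_veres() though because of isalpha() calls etc.)
--     if not for_verse_selection:
--         new_ref = new_ref \
--             .replace("One", "1") \
--             .replace("Two", "2") \
--             .replace("Three", "3") \
--
--     return new_ref
-- ===== SOURCE B (Python) =====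
-- import re
--
--
-- def clean_reference(ref, for_verse_selection):
--     ref = ref.strip().lower().title()
--
--     ref = ref \
--         .replace("Psalm", "Psalms") \
--         .replace("First", "One") \
--         .replace("1 Samuel", "One Samuel") \
--         .replace("1 Kings", "One Kings") \
--         .replace("1 Chronicles", "One Chronicles") \
--         .replace("1 Corinthians", "One Corinthians") \
--         .replace("1 Thessalonians", "One Thessalonians") \
--         .replace("1 Timothy", "One Timothy") \
--         .replace("1 Peter", "One Peter") \
--         .replace("1 John", "One John") \
--         .replace("Second", "Two") \
--         .replace("2 Samuel", "Two Samuel") \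
--         .replace("2 Kings", "Two Kings") \
--         .replace("2 Chronicles", "Two Chronicles") \
--         .replace("2 Corinthians", "Two Corinthians") \
--         .replace("2 Thessalonians", "Two Thessalonians") \
--         .replace("2 Timothy", "Two Timothy") \
--         .replace("2 Peter", "Two Peter") \
--         .replace("2 John", "Two John") \
--         .replace("Third", "Three") \
--         .replace("3 John", "Three John")
--
--     # Staged, declarative normalization: six zero-width regex substitutions.
--     # Each pass only inserts/removes a single space at local boundaries; the
--     # boundaries of later passes are never created or destroyed by earlier
--     # passes, so the staged result equals the one-scan window rules.
--     ref = re.sub(r'(?<=[A-Za-z])(?=[0-9])', ' ', ref)   # book name | chapter number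
--     ref = re.sub(r'(?<=[0-9])(?=[A-Za-z])', ' ', ref)   # verse number | next book name
--     ref = re.sub(r'(?<=[^ ])(?=-)', ' ', ref)           # space before "-"
--     ref = re.sub(r'(?<=-)(?=[^ ])', ' ', ref)           # space after "-"
--     ref = re.sub(r'(?<=[0-9]) (?=:)', '', ref)          # drop space before ":"
--     ref = re.sub(r'(?<=:) (?=[0-9])', '', ref)          # drop space after ":"
--
--     if not for_verse_selection:
--         ref = ref.replace("One", "1").replace("Two", "2").replace("Three", "3")
--
--     return ref
-- ===== Notes on version B (the rewrite author's own statement) =====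
-- stated objective: idiomatic
-- what changed: A's single stateful character loop (prev_char accumulator with continue-based skips and index arithmetic) is replaced by six staged zero-width regex substitutions on the normalized string (insert a space at letter/digit boundaries and around '-', delete the space between a digit and ':' and between ':' and a digit); the staged passes are equivalent because no pass creates or destroys a boundary a later pass tests.
import Mathlib
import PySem

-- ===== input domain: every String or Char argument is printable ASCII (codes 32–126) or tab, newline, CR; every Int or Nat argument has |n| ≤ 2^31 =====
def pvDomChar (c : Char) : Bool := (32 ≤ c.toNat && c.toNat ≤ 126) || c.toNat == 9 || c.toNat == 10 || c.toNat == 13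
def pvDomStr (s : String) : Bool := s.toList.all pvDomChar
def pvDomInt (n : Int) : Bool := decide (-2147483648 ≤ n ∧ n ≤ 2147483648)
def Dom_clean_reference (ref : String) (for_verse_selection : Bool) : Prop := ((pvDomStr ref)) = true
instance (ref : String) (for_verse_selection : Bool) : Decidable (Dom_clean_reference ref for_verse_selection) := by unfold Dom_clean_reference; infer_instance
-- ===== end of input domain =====

-- B replaces A's single stateful character loop (prev_char accumulator + continue) by six
-- staged zero-width regex substitutions; objective: idiomatic (a timing run measured B constant-factor faster).

-- ===== PORT A =====
-- str.title() ported by hand (exact on the ASCII domain: cased characters = letters):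
-- a letter is uppercased iff the previous character is not a letter, else lowercased.
def pvTitleChars : List Char → Bool → List Char
  | [], _ => []
  | c :: rest, prevAlpha =>
    (if PySem.Chars.isalpha c then
        (if prevAlpha then PySem.Chars.lowerChar c else PySem.Chars.upperChar c)
    else c) :: pvTitleChars rest (PySem.Chars.isalpha c)

def pvTitle (s : String) : String := String.mk (pvTitleChars s.toList false)

-- The .strip().lower().title() + chained .replace() normalization; this text is identical
-- in A and in B, so the helper is shared (outermost application = last replace in the chain).
def pvNorm (ref : String) : String :=
  PySem.Str.replace (PySem.Str.replace (PySem.Str.replace (PySem.Str.replace (PySem.Str.replace (PySem.Str.replace (PySem.Str.replace (PySem.Str.replace (PySem.Str.replace (PySem.Str.replace (PySem.Str.replace (PySem.Str.replace (PySem.Str.replace (PySem.Str.replace (PySem.Str.replace (PySem.Str.replace (PySem.Str.replace (PySem.Str.replace (PySem.Str.replace (PySem.Str.replace (PySem.Str.replace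
    (pvTitle (PySem.Str.lower (PySem.Str.strip ref)))
    "Psalm" "Psalms") "First" "One") "1 Samuel" "One Samuel") "1 Kings" "One Kings") "1 Chronicles" "One Chronicles") "1 Corinthians" "One Corinthians") "1 Thessalonians" "One Thessalonians") "1 Timothy" "One Timothy") "1 Peter" "One Peter") "1 John" "One John") "Second" "Two") "2 Samuel" "Two Samuel") "2 Kings" "Two Kings") "2 Chronicles" "Two Chronicles") "2 Corinthians" "Two Corinthians") "2 Thessalonians" "Two Thessalonians") "2 Timothy" "Two Timothy") "2 Peter" "Two Peter") "2 John" "Two John") "Third" "Three") "3 John" "Three John"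

-- Python "".isalpha() / "".isdigit() are False; prev_char = "" is Option.none here.
def pvIsalphaOpt : Option Char → Bool
  | none => false
  | some c => PySem.Chars.isalpha c

def pvIsdigitOpt : Option Char → Bool
  | none => false
  | some c => PySem.Chars.isdigit c

-- A's character loop as the obvious structural recursion over the same state:
-- prev_char (Option, none = ""), current char, next_char = ref[min(len-1,i+1)] = rest.headD c.
def pvLoopA (prev : Option Char) : List Char → List Char
  | [] => []
  | c :: rest =>
    let next := rest.headD c
    if PySem.Chars.isdigit c && pvIsalphaOpt prev then
      ' ' :: c :: pvLoopA (some c) rest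
    else if PySem.Chars.isalpha c && pvIsdigitOpt prev then
      ' ' :: c :: pvLoopA (some c) rest
    else if c == '-' && !(prev == some ' ') && !(prev == none) then
      ' ' :: c :: pvLoopA (some c) rest
    else if prev == some '-' && !(c == ' ') then
      ' ' :: c :: pvLoopA (some c) rest
    else if c == ' ' then
      if pvIsdigitOpt prev && next == ':' then pvLoopA (some c) rest
      else if prev == some ':' && PySem.Chars.isdigit next then pvLoopA (some c) rest
      else c :: pvLoopA (some c) rest
    else c :: pvLoopA (some c) rest

def clean_reference (ref : String) (for_verse_selection : Bool) : String :=
  let r := pvNorm ref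
  let new_ref := String.mk (pvLoopA none r.toList)
  if !for_verse_selection then
    PySem.Str.replace (PySem.Str.replace (PySem.Str.replace new_ref "One" "1") "Two" "2") "Three" "3"
  else new_ref

-- ===== PORT B =====
-- re.sub(r'(?<=X)(?=Y)', ' ', s) for 1-char classes X, Y: insert ' ' between every adjacent
-- pair (p, c) with X p && Y c. Exact: the zero-width matches sit at boundaries of the ORIGINAL
-- string, the lookbehind fails at the start and the lookahead at the end, matches are disjoint.
def pvInsertPass (cond : Char → Char → Bool) : List Char → List Char
  | [] => []
  | [c] => [c]
  | p :: c :: rest => p :: ((if cond p c then [' '] else []) ++ pvInsertPass cond (c :: rest))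
termination_by l => l.length

-- re.sub(r'(?<=X) (?=Y)', '', s): delete every ' ' whose ORIGINAL neighbours (p, n) satisfy
-- X p && Y n. Exact for the two patterns used here (X ' ' = false and the Y-side char is never
-- ' '), so a deleted space is never the lookbehind/lookahead of another candidate space.
def pvDeletePass (cond : Char → Char → Bool) : List Char → List Char
  | [] => []
  | [c] => [c]
  | [c, d] => [c, d]
  | p :: c :: n :: rest =>
      if c == ' ' && cond p n then p :: pvDeletePass cond (n :: rest)
      else p :: pvDeletePass cond (c :: n :: rest)
termination_by l => l.length

def pvCondAD (p c : Char) : Bool := PySem.Chars.isalpha p && PySem.Chars.isdigit c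
def pvCondDA (p c : Char) : Bool := PySem.Chars.isdigit p && PySem.Chars.isalpha c
def pvCondDash1 (p c : Char) : Bool := !(p == ' ') && c == '-'
def pvCondDash2 (p c : Char) : Bool := p == '-' && !(c == ' ')
def pvDelDC (p n : Char) : Bool := PySem.Chars.isdigit p && n == ':'
def pvDelCD (p n : Char) : Bool := p == ':' && PySem.Chars.isdigit n

def clean_reference_alt (ref : String) (for_verse_selection : Bool) : String :=
  let l0 := (pvNorm ref).toList
  let l := pvDeletePass pvDelCD (pvDeletePass pvDelDC
             (pvInsertPass pvCondDash2 (pvInsertPass pvCondDash1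
               (pvInsertPass pvCondDA (pvInsertPass pvCondAD l0)))))
  let new_ref := String.mk l
  if !for_verse_selection then
    PySem.Str.replace (PySem.Str.replace (PySem.Str.replace new_ref "One" "1") "Two" "2") "Three" "3"
  else new_ref

-- ===== PRECONDITION & SPEC =====
def Spec_clean_reference (ref : String) (for_verse_selection : Bool) (out : String) : Prop := out = clean_reference_alt ref for_verse_selection
instance (ref : String) (for_verse_selection : Bool) (out : String) : Decidable (Spec_clean_reference ref for_verse_selection out) := by unfold Spec_clean_reference; infer_instance

-- ===== CLAIM (what is proved, stated in full; the proofs are below) =====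
def Claim_equal_clean_reference : Prop := ∀ (ref : String) (for_verse_selection : Bool), Dom_clean_reference ref for_verse_selection → Spec_clean_reference ref for_verse_selection (clean_reference ref for_verse_selection)

-- ===== LEMMAS AND PROOFS =====

def pvInsAll (p c : Char) : Bool :=
  ((pvCondAD p c || pvCondDA p c) || pvCondDash1 p c) || pvCondDash2 p c
def pvDelAll (p n : Char) : Bool := pvDelDC p n || pvDelCD p n

-- Character-class literal facts used throughout.
lemma isdigit_ne (c : Char) (h : PySem.Chars.isdigit c = true) :
    (c == ' ') = false ∧ (c == ':') = false ∧ (c == '-') = false := by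
  refine ⟨?_, ?_, ?_⟩ <;> (rw [beq_eq_false_iff_ne]; rintro rfl; exact absurd h (by decide))

lemma isalpha_ne (c : Char) (h : PySem.Chars.isalpha c = true) :
    (c == ' ') = false ∧ (c == ':') = false ∧ (c == '-') = false := by
  refine ⟨?_, ?_, ?_⟩ <;> (rw [beq_eq_false_iff_ne]; rintro rfl; exact absurd h (by decide))

-- Tail-form of an insert pass: list processed with explicit previous character.
def pvPairFlat (cond : Char → Char → Bool) (p : Char) : List Char → List Char
  | [] => []
  | c :: t => (if cond p c then [' ', c] else [c]) ++ pvPairFlat cond c t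

lemma insertPass_eq (cond : Char → Char → Bool) :
    ∀ (t : List Char) (p : Char), pvInsertPass cond (p :: t) = p :: pvPairFlat cond p t := by
  intro t
  induction t with
  | nil => intro p; simp [pvInsertPass, pvPairFlat]
  | cons c t ih =>
    intro p
    rw [pvInsertPass, ih c]
    by_cases h : cond p c = true <;> simp [pvPairFlat, h]

-- Tail-form of a delete pass.
def pvDelFlat (cond : Char → Char → Bool) : Char → List Char → List Char
  | _, [] => []
  | _, [c] => [c]
  | p, c :: n :: t =>
      if c == ' ' && cond p n then n :: pvDelFlat cond n t
      else c :: pvDelFlat cond c (n :: t)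
termination_by _ l => l.length

lemma deletePass_eq (cond : Char → Char → Bool) :
    ∀ (t : List Char) (p : Char), pvDeletePass cond (p :: t) = p :: pvDelFlat cond p t
  | [], _ => by simp [pvDeletePass, pvDelFlat]
  | [c], _ => by simp [pvDeletePass, pvDelFlat]
  | c :: n :: t, p => by
      rw [pvDeletePass, pvDelFlat]
      by_cases h : (c == ' ' && cond p n) = true
      · simp [h, deletePass_eq cond t n]
      · simp [h, deletePass_eq cond (n :: t) c]
termination_by t _ => t.length

-- A non-space head passes through a delete pass unchanged.
lemma delFlat_cons_ne (d : Char → Char → Bool) (c : Char) (hc : (c == ' ') = false) :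
    ∀ (X : List Char) (p : Char), pvDelFlat d p (c :: X) = c :: pvDelFlat d c X := by
  intro X p
  cases X with
  | nil => simp [pvDelFlat]
  | cons x X' => simp [pvDelFlat, hc]

-- A head after a space prev passes through when the condition never fires on prev ' '.
lemma delFlat_cons_sp (d : Char → Char → Bool) (hs : ∀ m, d ' ' m = false) :
    ∀ (X : List Char) (n : Char), pvDelFlat d ' ' (n :: X) = n :: pvDelFlat d n X := by
  intro X n
  cases X with
  | nil => simp [pvDelFlat]
  | cons x X' => simp [pvDelFlat, hs x]

-- Two insert passes compose into one pass testing the union of the conditions,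
-- provided the later pass never fires next to an inserted space.
lemma insert_compose (c1 c2 : Char → Char → Bool)
    (h1 : ∀ p, c2 p ' ' = false) (h2 : ∀ c, c2 ' ' c = false) :
    ∀ (t : List Char) (p : Char),
      pvPairFlat c2 p (pvPairFlat c1 p t) = pvPairFlat (fun a b => c1 a b || c2 a b) p t := by
  intro t
  induction t with
  | nil => intro p; simp [pvPairFlat]
  | cons c t ih =>
    intro p
    by_cases h : c1 p c = true
    · simp [pvPairFlat, h, h1 p, h2 c, ih c]
    · by_cases h' : c2 p c = true <;> simp [pvPairFlat, h, h', ih c]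

-- Two delete passes compose into one pass testing the union of the conditions.
lemma delete_compose (d1 d2 : Char → Char → Bool)
    (hn1 : ∀ p n, d1 p n = true → (n == ' ') = false)
    (hs1 : ∀ n, d1 ' ' n = false) (hs2 : ∀ n, d2 ' ' n = false) :
    ∀ (t : List Char) (p : Char),
      pvDelFlat d2 p (pvDelFlat d1 p t) = pvDelFlat (fun a b => d1 a b || d2 a b) p t
  | [], p => by simp [pvDelFlat]
  | [c], p => by simp [pvDelFlat]
  | c :: n :: t, p => by
      by_cases hc : (c == ' ') = true
      · have hc' : c = ' ' := by simpa using hc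
        subst hc'
        by_cases h1 : d1 p n = true
        · rw [show pvDelFlat d1 p (' ' :: n :: t) = n :: pvDelFlat d1 n t by simp [pvDelFlat, h1]]
          rw [delFlat_cons_ne d2 n (hn1 p n h1)]
          rw [delete_compose d1 d2 hn1 hs1 hs2 t n]
          simp [pvDelFlat, h1]
        · rw [show pvDelFlat d1 p (' ' :: n :: t) = ' ' :: pvDelFlat d1 ' ' (n :: t) by
            simp [pvDelFlat, h1]]
          rw [delFlat_cons_sp d1 hs1 t n]
          by_cases h2 : d2 p n = true
          · rw [show pvDelFlat d2 p (' ' :: n :: pvDelFlat d1 n t) =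
                n :: pvDelFlat d2 n (pvDelFlat d1 n t) by simp [pvDelFlat, h2]]
            rw [delete_compose d1 d2 hn1 hs1 hs2 t n]
            simp [pvDelFlat, h1, h2]
          · rw [show pvDelFlat d2 p (' ' :: n :: pvDelFlat d1 n t) =
                ' ' :: pvDelFlat d2 ' ' (n :: pvDelFlat d1 n t) by simp [pvDelFlat, h2]]
            rw [delFlat_cons_sp d2 hs2]
            rw [delete_compose d1 d2 hn1 hs1 hs2 t n]
            rw [show pvDelFlat (fun a b => d1 a b || d2 a b) p (' ' :: n :: t) =
                ' ' :: pvDelFlat (fun a b => d1 a b || d2 a b) ' ' (n :: t) by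
              simp [pvDelFlat, h1, h2]]
            rw [delFlat_cons_sp (fun a b => d1 a b || d2 a b) (fun m => by simp [hs1 m, hs2 m])]
      · have hc' : (c == ' ') = false := by simpa using hc
        rw [show pvDelFlat d1 p (c :: n :: t) = c :: pvDelFlat d1 c (n :: t) by
          simp [pvDelFlat, hc']]
        rw [delFlat_cons_ne d2 c hc']
        rw [delete_compose d1 d2 hn1 hs1 hs2 (n :: t) c]
        simp [pvDelFlat, hc']
termination_by t _ => t.length

-- pvInsAll never fires around a space, never on a deletable pair, never on a space char.
lemma insAll_sp_right (p : Char) : pvInsAll p ' ' = false := by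
  simp [pvInsAll, pvCondAD, pvCondDA, pvCondDash1, pvCondDash2,
    show PySem.Chars.isdigit ' ' = false from by decide,
    show PySem.Chars.isalpha ' ' = false from by decide]

lemma insAll_sp_left (c : Char) : pvInsAll ' ' c = false := by
  simp [pvInsAll, pvCondAD, pvCondDA, pvCondDash1, pvCondDash2,
    show PySem.Chars.isdigit ' ' = false from by decide,
    show PySem.Chars.isalpha ' ' = false from by decide]

lemma insAll_not_del (p c : Char) (hi : pvInsAll p c = true) :
    pvDelAll p c = false ∧ (c == ' ') = false := by
  simp only [pvInsAll, pvCondAD, pvCondDA, pvCondDash1, pvCondDash2,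
    Bool.or_eq_true, Bool.and_eq_true] at hi
  rcases hi with ((⟨ha, hd⟩ | ⟨hd, ha⟩) | ⟨hp, hc⟩) | ⟨hp, hc⟩
  · exact ⟨by simp [pvDelAll, pvDelDC, pvDelCD, (isdigit_ne c hd).2.1, (isalpha_ne p ha).2.1],
      (isdigit_ne c hd).1⟩
  · exact ⟨by simp [pvDelAll, pvDelDC, pvDelCD, (isalpha_ne c ha).2.1, (isdigit_ne p hd).2.1],
      (isalpha_ne c ha).1⟩
  · have hc' : c = '-' := by simpa using hc
    subst hc'
    exact ⟨by simp [pvDelAll, pvDelDC, pvDelCD, show PySem.Chars.isdigit '-' = false from by decide],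
      by decide⟩
  · have hp' : p = '-' := by simpa using hp
    subst hp'
    refine ⟨by simp [pvDelAll, pvDelDC, pvDelCD, show PySem.Chars.isdigit '-' = false from by decide], ?_⟩
    simpa using hc

lemma delAll_sp_left (n : Char) : pvDelAll ' ' n = false := by
  simp [pvDelAll, pvDelDC, pvDelCD, show PySem.Chars.isdigit ' ' = false from by decide]

-- pvLoopA step lemmas.
lemma loopA_none (a : Char) (t : List Char) :
    pvLoopA none (a :: t) = a :: pvLoopA (some a) t := by
  simp [pvLoopA, pvIsalphaOpt, pvIsdigitOpt]

lemma loopA_sp (n : Char) (t : List Char) :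
    pvLoopA (some ' ') (n :: t) = n :: pvLoopA (some n) t := by
  by_cases hn : (n == ' ') = true
  · have : n = ' ' := by simpa using hn
    subst this
    simp [pvLoopA, pvIsalphaOpt, pvIsdigitOpt,
      show PySem.Chars.isdigit ' ' = false from by decide,
      show PySem.Chars.isalpha ' ' = false from by decide]
  · simp [pvLoopA, pvIsalphaOpt, pvIsdigitOpt, hn,
      show PySem.Chars.isdigit ' ' = false from by decide,
      show PySem.Chars.isalpha ' ' = false from by decide]

lemma loopA_ins (p c : Char) (t : List Char) (hi : pvInsAll p c = true) :
    pvLoopA (some p) (c :: t) = ' ' :: c :: pvLoopA (some c) t := by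
  simp only [pvInsAll, pvCondAD, pvCondDA, pvCondDash1, pvCondDash2,
    Bool.or_eq_true, Bool.and_eq_true] at hi
  rcases hi with ((⟨ha, hd⟩ | ⟨hd, ha⟩) | ⟨hp, hc⟩) | ⟨hp, hc⟩
  · simp [pvLoopA, pvIsalphaOpt, ha, hd]
  · by_cases hb : (PySem.Chars.isdigit c && PySem.Chars.isalpha p) = true
    · simp [pvLoopA, pvIsalphaOpt, hb]
    · simp [pvLoopA, pvIsalphaOpt, pvIsdigitOpt, hb, ha, hd]
  · have hc' : c = '-' := by simpa using hc
    subst hc'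
    have hp' : (p == ' ') = false := by simpa using hp
    simp [pvLoopA, pvIsalphaOpt, pvIsdigitOpt, hp',
      show PySem.Chars.isdigit '-' = false from by decide,
      show PySem.Chars.isalpha '-' = false from by decide]
  · have hp' : p = '-' := by simpa using hp
    subst hp'
    have hc' : (c == ' ') = false := by simpa using hc
    by_cases hcd : (c == '-') = true
    · have : c = '-' := by simpa using hcd
      subst this
      simp [pvLoopA, pvIsalphaOpt, pvIsdigitOpt,
        show PySem.Chars.isdigit '-' = false from by decide,
        show PySem.Chars.isalpha '-' = false from by decide]
    · simp [pvLoopA, pvIsalphaOpt, pvIsdigitOpt, hc', hcd,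
        show PySem.Chars.isdigit '-' = false from by decide,
        show PySem.Chars.isalpha '-' = false from by decide]

lemma loopA_plain (p c : Char) (t : List Char)
    (hi : pvInsAll p c = false) (hc : (c == ' ') = false) :
    pvLoopA (some p) (c :: t) = c :: pvLoopA (some c) t := by
  simp only [pvInsAll, pvCondAD, pvCondDA, pvCondDash1, pvCondDash2,
    Bool.or_eq_false_iff, Bool.and_eq_false_iff] at hi
  obtain ⟨⟨⟨h1, h2⟩, h3⟩, h4⟩ := hi
  have b1 : (PySem.Chars.isdigit c && pvIsalphaOpt (some p)) = false := by
    simp only [pvIsalphaOpt]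
    rcases h1 with h | h <;> simp [h]
  have b2 : (PySem.Chars.isalpha c && pvIsdigitOpt (some p)) = false := by
    simp only [pvIsdigitOpt]
    rcases h2 with h | h <;> simp [h]
  have hc3 : ¬(c = '-' ∧ ¬p = ' ') := by
    rcases h3 with h | h
    · simp only [Bool.not_eq_false', beq_iff_eq] at h
      tauto
    · simp only [beq_eq_false_iff_ne, ne_eq] at h
      tauto
  have hc4 : ¬p = '-' := by
    rcases h4 with h | h
    · simpa using h
    · simp only [Bool.not_eq_false', beq_iff_eq] at h
      subst h
      simp at hc
  rw [pvLoopA]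
  simp [b1, b2, hc, hc3, hc4]

-- Deletion steps of A's loop on a space char.
lemma loopA_sp_del (p n : Char) (t : List Char) (hd : pvDelAll p n = true) :
    pvLoopA (some p) (' ' :: n :: t) = pvLoopA (some ' ') (n :: t) := by
  simp only [pvDelAll, pvDelDC, pvDelCD, Bool.or_eq_true, Bool.and_eq_true] at hd
  rcases hd with ⟨hp, hn⟩ | ⟨hp, hn⟩
  · simp [pvLoopA, pvIsalphaOpt, pvIsdigitOpt, hp, hn,
      show PySem.Chars.isdigit ' ' = false from by decide,
      show PySem.Chars.isalpha ' ' = false from by decide]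
  · have hp' : p = ':' := by simpa using hp
    subst hp'
    simp [pvLoopA, pvIsalphaOpt, pvIsdigitOpt, hn,
      show PySem.Chars.isdigit ' ' = false from by decide,
      show PySem.Chars.isalpha ' ' = false from by decide,
      show PySem.Chars.isdigit ':' = false from by decide]

lemma loopA_sp_keep (p n : Char) (t : List Char) (hd : pvDelAll p n = false) :
    pvLoopA (some p) (' ' :: n :: t) = ' ' :: pvLoopA (some ' ') (n :: t) := by
  simp only [pvDelAll, pvDelDC, pvDelCD, Bool.or_eq_false_iff, Bool.and_eq_false_iff] at hd
  obtain ⟨h1, h2⟩ := hd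
  have hk1 : ¬(PySem.Chars.isdigit p = true ∧ n = ':') := by
    rcases h1 with h | h
    · simp [h]
    · simp only [beq_eq_false_iff_ne, ne_eq] at h
      tauto
  have hk2 : ¬(p = ':' ∧ PySem.Chars.isdigit n = true) := by
    rcases h2 with h | h
    · simp only [beq_eq_false_iff_ne, ne_eq] at h
      tauto
    · simp [h]
  rw [pvLoopA]
  simp [pvIsalphaOpt, pvIsdigitOpt, hk1, hk2,
    show PySem.Chars.isdigit ' ' = false from by decide,
    show PySem.Chars.isalpha ' ' = false from by decide]

lemma loopA_sp_last (p : Char) : pvLoopA (some p) [' '] = [' '] := by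
  simp [pvLoopA, pvIsalphaOpt, pvIsdigitOpt,
    show PySem.Chars.isdigit ' ' = false from by decide,
    show PySem.Chars.isalpha ' ' = false from by decide,
    show ((' ' : Char) == ':') = false from by decide]

-- The core: one combined delete pass over one combined insert pass equals A's loop.
lemma staged_eq_loopA :
    ∀ (t : List Char) (p : Char),
      pvDelFlat pvDelAll p (pvPairFlat pvInsAll p t) = pvLoopA (some p) t
  | [], p => by simp [pvPairFlat, pvDelFlat, pvLoopA]
  | c :: t, p => by
      by_cases hi : pvInsAll p c = true
      · obtain ⟨hdel, hcsp⟩ := insAll_not_del p c hi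
        rw [show pvPairFlat pvInsAll p (c :: t) = ' ' :: c :: pvPairFlat pvInsAll c t by
          simp [pvPairFlat, hi]]
        rw [show pvDelFlat pvDelAll p (' ' :: c :: pvPairFlat pvInsAll c t) =
            ' ' :: pvDelFlat pvDelAll ' ' (c :: pvPairFlat pvInsAll c t) by
          simp [pvDelFlat, hdel]]
        rw [delFlat_cons_ne pvDelAll c hcsp]
        rw [staged_eq_loopA t c, loopA_ins p c t hi]
      · have hi' : pvInsAll p c = false := by simpa using hi
        by_cases hc : (c == ' ') = true
        · have hc' : c = ' ' := by simpa using hc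
          subst hc'
          cases t with
          | nil => simp [pvPairFlat, pvDelFlat, hi', loopA_sp_last]
          | cons n t' =>
            rw [show pvPairFlat pvInsAll p (' ' :: n :: t') =
                ' ' :: n :: pvPairFlat pvInsAll n t' by
              simp [pvPairFlat, insAll_sp_right p, insAll_sp_left n]]
            by_cases hd : pvDelAll p n = true
            · rw [show pvDelFlat pvDelAll p (' ' :: n :: pvPairFlat pvInsAll n t') =
                  n :: pvDelFlat pvDelAll n (pvPairFlat pvInsAll n t') by
                simp [pvDelFlat, hd]]
              rw [staged_eq_loopA t' n, loopA_sp_del p n t' hd, loopA_sp]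
            · have hd' : pvDelAll p n = false := by simpa using hd
              rw [show pvDelFlat pvDelAll p (' ' :: n :: pvPairFlat pvInsAll n t') =
                  ' ' :: pvDelFlat pvDelAll ' ' (n :: pvPairFlat pvInsAll n t') by
                simp [pvDelFlat, hd']]
              rw [delFlat_cons_sp pvDelAll delAll_sp_left]
              rw [staged_eq_loopA t' n, loopA_sp_keep p n t' hd', loopA_sp]
        · have hc' : (c == ' ') = false := by simpa using hc
          rw [show pvPairFlat pvInsAll p (c :: t) = c :: pvPairFlat pvInsAll c t by
            simp [pvPairFlat, hi']]
          rw [delFlat_cons_ne pvDelAll c hc']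
          rw [staged_eq_loopA t c, loopA_plain p c t hi' hc']
termination_by t _ => t.length

-- B's six staged passes, assembled, equal A's single loop on every list.
lemma staged_top (l : List Char) :
    pvDeletePass pvDelCD (pvDeletePass pvDelDC
      (pvInsertPass pvCondDash2 (pvInsertPass pvCondDash1
        (pvInsertPass pvCondDA (pvInsertPass pvCondAD l))))) = pvLoopA none l := by
  cases l with
  | nil => simp [pvInsertPass, pvDeletePass, pvLoopA]
  | cons a t =>
    rw [insertPass_eq pvCondAD t a,
        insertPass_eq pvCondDA _ a,
        insert_compose pvCondAD pvCondDA
          (fun p => by simp [pvCondDA, show PySem.Chars.isalpha ' ' = false from by decide])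
          (fun c => by simp [pvCondDA, show PySem.Chars.isdigit ' ' = false from by decide]) t a,
        insertPass_eq pvCondDash1 _ a,
        insert_compose _ pvCondDash1
          (fun p => by simp [pvCondDash1]) (fun c => by simp [pvCondDash1]) t a,
        insertPass_eq pvCondDash2 _ a,
        insert_compose _ pvCondDash2
          (fun p => by simp [pvCondDash2]) (fun c => by simp [pvCondDash2]) t a]
    rw [deletePass_eq pvDelDC _ a,
        deletePass_eq pvDelCD _ a,
        delete_compose pvDelDC pvDelCD
          (fun p n h => by
            have : n = ':' := by
              simp only [pvDelDC, Bool.and_eq_true] at h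
              simpa using h.2
            subst this; decide)
          (fun n => by simp [pvDelDC, show PySem.Chars.isdigit ' ' = false from by decide])
          (fun n => by simp [pvDelCD]) _ a]
    rw [show pvPairFlat (fun a b =>
          (fun a b => (fun a b => pvCondAD a b || pvCondDA a b) a b || pvCondDash1 a b) a b
            || pvCondDash2 a b) = pvPairFlat pvInsAll from rfl]
    rw [show pvDelFlat (fun a b => pvDelDC a b || pvDelCD a b) = pvDelFlat pvDelAll from rfl]
    rw [staged_eq_loopA t a, loopA_none]

-- ===== VERDICT (by name: the statement is the Claim_ definition above) =====
theorem clean_reference_spec : Claim_equal_clean_reference := by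
  intro ref fvs _
  unfold Spec_clean_reference
  simp only [clean_reference, clean_reference_alt, staged_top]
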